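-- pv_equiv track=rewrite | github.com/rudrasingh500/agentic-video-editor | backend/utils/frame_editing.py | _expand_replace_indices
-- ===== SOURCE A (Python) =====
-- def _expand_replace_indices(
--     selected_indices: list[int],
--     total_frames: int,
--     frame_repeat_count: int,
-- ) -> list[int]:
--     if frame_repeat_count <= 1:
--         return sorted({idx for idx in selected_indices if 0 <= idx < total_frames})
--
--     expanded: set[int] = set()
--     for idx in selected_indices:
--         for offset in range(frame_repeat_count):
--             candidate = idx + offset
--             if 0 <= candidate < total_frames:
--                 expanded.add(candidate)
--     return sorted(expanded)
-- ===== SOURCE B (Python) =====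
-- def _expand_replace_indices(
--     selected_indices: list[int],
--     total_frames: int,
--     frame_repeat_count: int,
-- ) -> list[int]:
--     repeat = frame_repeat_count if frame_repeat_count > 1 else 1
--     intervals: list[tuple[int, int]] = []
--     for idx in sorted(selected_indices):
--         lo = idx if idx > 0 else 0
--         hi = idx + repeat if idx + repeat < total_frames else total_frames
--         if lo >= hi:
--             continue
--         if intervals and lo <= intervals[-1][1]:
--             if hi > intervals[-1][1]:
--                 intervals[-1] = (intervals[-1][0], hi)
--         else:
--             intervals.append((lo, hi))
--     return [k for lo, hi in intervals for k in range(lo, hi)]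
-- ===== Notes on version B (the rewrite author's own statement) =====
-- stated objective: faster
-- what changed: Instead of materialising every repeated index in a hash set and sorting it, B sorts the indices once, merges the clipped [idx, idx+repeat) intervals in one pass, and emits the integers of the disjoint merged intervals already in order.
import Mathlib
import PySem

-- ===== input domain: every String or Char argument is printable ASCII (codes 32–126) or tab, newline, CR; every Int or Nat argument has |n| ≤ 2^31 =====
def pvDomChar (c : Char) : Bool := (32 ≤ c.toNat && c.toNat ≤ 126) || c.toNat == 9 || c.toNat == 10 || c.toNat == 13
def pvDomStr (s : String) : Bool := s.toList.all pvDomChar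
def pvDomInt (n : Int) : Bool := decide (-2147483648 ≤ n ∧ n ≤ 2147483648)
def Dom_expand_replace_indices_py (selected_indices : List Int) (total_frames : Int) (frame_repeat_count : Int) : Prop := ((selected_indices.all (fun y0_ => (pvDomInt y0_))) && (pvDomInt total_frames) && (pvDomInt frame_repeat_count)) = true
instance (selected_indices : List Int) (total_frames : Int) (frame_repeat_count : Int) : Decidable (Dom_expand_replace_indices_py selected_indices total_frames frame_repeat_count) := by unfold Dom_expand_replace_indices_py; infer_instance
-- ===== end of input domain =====

-- B replaces A's per-index per-offset hash-set expansion by sort + one-pass interval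
-- merge + in-order emission (objective: faster; same return value everywhere).

-- ===== PORT A =====
def expand_replace_indices_py (selected_indices : List Int) (total_frames : Int) (frame_repeat_count : Int) : List Int :=
  if frame_repeat_count ≤ 1 then
    PySem.List.sorted
      (PySem.Set.ofList (selected_indices.filter (fun idx => decide (0 ≤ idx ∧ idx < total_frames))))
      (fun x => x) false
  else
    let expanded : PySem.Set Int :=
      selected_indices.foldl (fun expanded idx =>
        (PySem.List.pyRange 0 frame_repeat_count 1).foldl (fun expanded offset =>
          if 0 ≤ idx + offset ∧ idx + offset < total_frames then
            PySem.Set.add expanded (idx + offset)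
          else expanded) expanded)
        PySem.Set.empty
    PySem.List.sorted expanded (fun x => x) false

-- ===== PORT B =====
-- One loop step of Source B's interval merge.  Source B appends at the END of `intervals` and
-- mutates `intervals[-1]`; the Lean accumulator keeps the intervals in REVERSE order
-- (head = Python's intervals[-1]) so that both operations are head operations, and the
-- final emission runs over acc.reverse (= Python's `intervals`).
def pvMergeStep (repeat_ total_frames : Int) (acc : List (Int × Int)) (idx : Int) : List (Int × Int) :=
  let lo := if idx > 0 then idx else 0
  let hi := if idx + repeat_ < total_frames then idx + repeat_ else total_frames
  if lo ≥ hi then acc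
  else
    match acc with
    | [] => [(lo, hi)]
    | (a, b) :: rest =>
      if lo ≤ b then (if hi > b then (a, hi) :: rest else (a, b) :: rest)
      else (lo, hi) :: (a, b) :: rest

def expand_replace_indices_py_alt (selected_indices : List Int) (total_frames : Int) (frame_repeat_count : Int) : List Int :=
  let repeat_ := if frame_repeat_count > 1 then frame_repeat_count else 1
  let intervals :=
    (PySem.List.sorted selected_indices (fun x => x) false).foldl
      (pvMergeStep repeat_ total_frames) []
  intervals.reverse.flatMap (fun p => PySem.List.pyRange p.1 p.2 1)

-- ===== PRECONDITION & SPEC =====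
def Spec_expand_replace_indices_py (selected_indices : List Int) (total_frames : Int) (frame_repeat_count : Int) (out : List Int) : Prop := out = expand_replace_indices_py_alt selected_indices total_frames frame_repeat_count
instance (selected_indices : List Int) (total_frames : Int) (frame_repeat_count : Int) (out : List Int) : Decidable (Spec_expand_replace_indices_py selected_indices total_frames frame_repeat_count out) := by unfold Spec_expand_replace_indices_py; infer_instance

-- ===== CLAIM (what is proved, stated in full; the proofs are below) =====
def Claim_equal_expand_replace_indices_py : Prop := ∀ (selected_indices : List Int) (total_frames : Int) (frame_repeat_count : Int), Dom_expand_replace_indices_py selected_indices total_frames frame_repeat_count → Spec_expand_replace_indices_py selected_indices total_frames frame_repeat_count (expand_replace_indices_py selected_indices total_frames frame_repeat_count)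

-- ===== LEMMAS AND PROOFS =====

-- the set of frames both programs return: 0 ≤ k < total and some selected index i
-- covers k with repeat factor rr
def pvCov (sel : List Int) (total rr k : Int) : Prop :=
  0 ≤ k ∧ k < total ∧ ∃ i ∈ sel, i ≤ k ∧ k < i + rr

-- two strictly increasing lists with the same members are equal
theorem pv_eq_of_pairwise_lt (l1 l2 : List Int) (h1 : l1.Pairwise (· < ·))
    (h2 : l2.Pairwise (· < ·)) (h : ∀ x, x ∈ l1 ↔ x ∈ l2) : l1 = l2 := by
  have hp : l1.Perm l2 := (List.perm_ext_iff_of_nodup h1.nodup h2.nodup).mpr h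
  exact hp.eq_of_pairwise (fun a b _ _ hab hba => absurd hba (not_lt.2 hab.le)) h1 h2

-- ---- A side: membership and distinctness of the expanded set ----

theorem gen_mem (idx total : Int) (L : List Int) (s : PySem.Set Int) (k : Int) :
    (k ∈ L.foldl (fun expanded offset =>
        if 0 ≤ idx + offset ∧ idx + offset < total then
          PySem.Set.add expanded (idx + offset)
        else expanded) s)
      ↔ k ∈ s ∨ ∃ o ∈ L, (0 ≤ idx + o ∧ idx + o < total) ∧ k = idx + o := by
  induction L generalizing s with
  | nil => simp
  | cons o t ih =>
    simp only [List.foldl_cons]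
    rw [ih]
    by_cases h : 0 ≤ idx + o ∧ idx + o < total
    · rw [if_pos h, PySem.Set.mem_add, List.exists_mem_cons_iff]
      tauto
    · rw [if_neg h, List.exists_mem_cons_iff]
      tauto

theorem pv_mem_inner_fold (r total idx : Int) (s : PySem.Set Int) (k : Int) :
    (k ∈ (PySem.List.pyRange 0 r 1).foldl (fun expanded offset =>
        if 0 ≤ idx + offset ∧ idx + offset < total then
          PySem.Set.add expanded (idx + offset)
        else expanded) s)
      ↔ k ∈ s ∨ (0 ≤ k ∧ k < total ∧ idx ≤ k ∧ k < idx + r) := by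
  rw [gen_mem]
  apply or_congr Iff.rfl
  constructor
  · rintro ⟨o, ho, hc, rfl⟩
    rw [PySem.List.mem_pyRange_one] at ho
    omega
  · rintro ⟨h0, h1, h2, h3⟩
    exact ⟨k - idx, PySem.List.mem_pyRange_one.mpr (by omega), by omega, by omega⟩

theorem pv_nodup_inner_fold (r total idx : Int) (s : PySem.Set Int) (hs : s.Nodup) :
    ((PySem.List.pyRange 0 r 1).foldl (fun expanded offset =>
        if 0 ≤ idx + offset ∧ idx + offset < total then
          PySem.Set.add expanded (idx + offset)
        else expanded) s).Nodup := by
  generalize (PySem.List.pyRange 0 r 1) = L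
  induction L generalizing s with
  | nil => exact hs
  | cons o t ih =>
    simp only [List.foldl_cons]
    split
    · exact ih _ (PySem.Set.nodup_add s (idx + o) hs)
    · exact ih _ hs

theorem pv_mem_outer_fold (sel : List Int) (r total : Int) (s : PySem.Set Int) (k : Int) :
    (k ∈ sel.foldl (fun expanded idx =>
        (PySem.List.pyRange 0 r 1).foldl (fun expanded offset =>
          if 0 ≤ idx + offset ∧ idx + offset < total then
            PySem.Set.add expanded (idx + offset)
          else expanded) expanded) s)
      ↔ k ∈ s ∨ (0 ≤ k ∧ k < total ∧ ∃ i ∈ sel, i ≤ k ∧ k < i + r) := by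
  induction sel generalizing s with
  | nil => simp
  | cons idx t ih =>
    simp only [List.foldl_cons]
    rw [ih, pv_mem_inner_fold, List.exists_mem_cons_iff]
    tauto

theorem pv_nodup_outer_fold (sel : List Int) (r total : Int) (s : PySem.Set Int) (hs : s.Nodup) :
    (sel.foldl (fun expanded idx =>
        (PySem.List.pyRange 0 r 1).foldl (fun expanded offset =>
          if 0 ≤ idx + offset ∧ idx + offset < total then
            PySem.Set.add expanded (idx + offset)
          else expanded) expanded) s).Nodup := by
  induction sel generalizing s with
  | nil => exact hs
  | cons idx t ih =>
    exact ih _ (pv_nodup_inner_fold r total idx s hs)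

theorem pvA_pairwise (sel : List Int) (total r : Int) :
    (expand_replace_indices_py sel total r).Pairwise (· < ·) := by
  unfold expand_replace_indices_py
  split
  · exact PySem.List.sorted_ofList_pairwise_lt _
  · have hn := pv_nodup_outer_fold sel r total PySem.Set.empty (by simp [PySem.Set.empty])
    rw [← PySem.Set.ofList_eq_self_of_nodup _ hn]
    exact PySem.List.sorted_ofList_pairwise_lt _

theorem pvA_mem (sel : List Int) (total r : Int) (k : Int) :
    k ∈ expand_replace_indices_py sel total r ↔ pvCov sel total (if r ≤ 1 then 1 else r) k := by
  unfold expand_replace_indices_py pvCov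
  split
  next h =>
    rw [PySem.List.mem_sorted, PySem.Set.mem_ofList, List.mem_filter]
    simp only [decide_eq_true_eq]
    constructor
    · rintro ⟨hk, h0, h1⟩
      exact ⟨h0, h1, k, hk, le_refl k, by omega⟩
    · rintro ⟨h0, h1, i, hi, hle, hlt⟩
      have : i = k := by omega
      subst this
      exact ⟨hi, h0, h1⟩
  next h =>
    rw [PySem.List.mem_sorted, pv_mem_outer_fold]
    simp [PySem.Set.empty]

-- ---- B side: invariant of the interval merge and of the emission ----

-- coverage of an interval accumulator
def pvCovS (acc : List (Int × Int)) (k : Int) : Prop := ∃ p ∈ acc, p.1 ≤ k ∧ k < p.2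

-- structural invariant of the (reversed) interval accumulator: every interval is
-- nonempty and inside [0, total], and intervals are strictly separated
def pvIvOK (total : Int) (acc : List (Int × Int)) : Prop :=
  (∀ p ∈ acc, p.1 < p.2 ∧ 0 ≤ p.1 ∧ p.2 ≤ total) ∧ List.IsChain (fun p q => q.2 < p.1) acc

theorem pv_rest_lt (total : Int) (p : Int × Int) (rest : List (Int × Int))
    (h : pvIvOK total (p :: rest)) : ∀ q ∈ rest, q.2 < p.1 := by
  induction rest generalizing p with
  | nil => simp
  | cons q rest' ih =>
    obtain ⟨hval, hch⟩ := h
    rw [List.isChain_cons_cons] at hch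
    intro q' hq'
    rcases List.mem_cons.mp hq' with rfl | hq'
    · exact hch.1
    · have h2 := ih q ⟨fun p hp => hval p (List.mem_cons_of_mem _ hp), hch.2⟩ q' hq'
      have := (hval q (by simp)).1
      omega

theorem pv_step (rr total x : Int) (acc : List (Int × Int)) (hacc : pvIvOK total acc)
    (hx : ∀ p ∈ acc, p.1 ≤ max x 0) :
    pvIvOK total (pvMergeStep rr total acc x) ∧
    (∀ k, pvCovS (pvMergeStep rr total acc x) k ↔
      pvCovS acc k ∨ (0 ≤ k ∧ k < total ∧ x ≤ k ∧ k < x + rr)) ∧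
    (∀ p ∈ pvMergeStep rr total acc x, p.1 ≤ max x 0) := by
  unfold pvMergeStep
  have hlo : (if x > 0 then x else 0) = max x 0 := by split <;> omega
  have hhi : (if x + rr < total then x + rr else total) = min (x + rr) total := by split <;> omega
  rw [hlo, hhi]
  set lo := max x 0 with hlo'
  set hi := min (x + rr) total with hhi'
  have hreg : ∀ k, (0 ≤ k ∧ k < total ∧ x ≤ k ∧ k < x + rr) ↔ (lo ≤ k ∧ k < hi) := by
    intro k; omega
  by_cases hskip : lo ≥ hi
  · rw [if_pos hskip]
    refine ⟨hacc, fun k => ?_, hx⟩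
    rw [hreg]
    constructor
    · exact Or.inl
    · rintro (h | h)
      · exact h
      · omega
  · rw [if_neg hskip]
    have hlohi : lo < hi := by omega
    match acc with
    | [] =>
      dsimp only
      refine ⟨⟨by simp; omega, by simp⟩, fun k => ?_, by simp⟩
      rw [hreg]
      simp [pvCovS]
    | (a, b) :: rest =>
      dsimp only
      have hab := (hacc.1 (a, b) (by simp))
      have hale : a ≤ lo := hx (a, b) (by simp)
      have hrest : ∀ q ∈ rest, q.2 < a := by
        have := pv_rest_lt total (a, b) rest hacc
        simpa using this
      have hvalr : ∀ p ∈ rest, p.1 < p.2 ∧ 0 ≤ p.1 ∧ p.2 ≤ total :=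
        fun p hp => hacc.1 p (List.mem_cons_of_mem _ hp)
      have hchr : List.IsChain (fun p q => q.2 < p.1) rest := hacc.2.tail
      by_cases hmerge : lo ≤ b
      · rw [if_pos hmerge]
        by_cases hext : hi > b
        · rw [if_pos hext]
          refine ⟨⟨?_, ?_⟩, fun k => ?_, ?_⟩
          · intro p hp
            rcases List.mem_cons.mp hp with rfl | hp
            · simp; omega
            · exact hvalr p hp
          · rcases rest with _ | ⟨q, rest'⟩
            · exact List.IsChain.singleton _
            · rw [List.isChain_cons_cons]
              exact ⟨hrest q (by simp), hchr⟩
          · simp only [pvCovS, List.exists_mem_cons_iff, hreg]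
            by_cases hC : ∃ p ∈ rest, p.1 ≤ k ∧ k < p.2 <;> simp [hC] <;> omega
          · intro p hp
            rcases List.mem_cons.mp hp with rfl | hp
            · simpa using hale
            · have := hrest p hp
              have := (hvalr p hp).1
              omega
        · rw [if_neg hext]
          refine ⟨hacc, fun k => ?_, hx⟩
          simp only [pvCovS, List.exists_mem_cons_iff, hreg]
          by_cases hC : ∃ p ∈ rest, p.1 ≤ k ∧ k < p.2 <;> simp [hC] <;> omega
      · rw [if_neg hmerge]
        refine ⟨⟨?_, ?_⟩, fun k => ?_, ?_⟩
        · intro p hp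
          rcases List.mem_cons.mp hp with rfl | hp
          · simp; omega
          · exact hacc.1 p hp
        · rw [List.isChain_cons_cons]
          exact ⟨by simp; omega, hacc.2⟩
        · simp only [pvCovS, List.exists_mem_cons_iff, hreg]
          by_cases hC : ∃ p ∈ rest, p.1 ≤ k ∧ k < p.2 <;> simp [hC] <;> omega
        · intro p hp
          rcases List.mem_cons.mp hp with rfl | hp
          · simp
          · exact hx p hp

theorem pv_fold_inv (rr total : Int) (xs : List Int) (hxs : xs.Pairwise (· ≤ ·))
    (acc : List (Int × Int)) (hacc : pvIvOK total acc)
    (hfut : ∀ x ∈ xs, ∀ p ∈ acc, p.1 ≤ max x 0) :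
    pvIvOK total (xs.foldl (pvMergeStep rr total) acc) ∧
    ∀ k, pvCovS (xs.foldl (pvMergeStep rr total) acc) k ↔
      pvCovS acc k ∨ (0 ≤ k ∧ k < total ∧ ∃ i ∈ xs, i ≤ k ∧ k < i + rr) := by
  induction xs generalizing acc with
  | nil =>
    refine ⟨hacc, fun k => ?_⟩
    simp
  | cons x t ih =>
    have hxt : ∀ y ∈ t, x ≤ y := fun y hy => List.rel_of_pairwise_cons hxs hy
    obtain ⟨h1, h2, h3⟩ := pv_step rr total x acc hacc (fun p hp => hfut x (by simp) p hp)
    have hfut' : ∀ y ∈ t, ∀ p ∈ pvMergeStep rr total acc x, p.1 ≤ max y 0 := by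
      intro y hy p hp
      have := h3 p hp
      have := hxt y hy
      omega
    obtain ⟨hI, hcov⟩ := ih hxs.of_cons _ h1 hfut'
    simp only [List.foldl_cons]
    refine ⟨hI, fun k => ?_⟩
    rw [hcov k, h2 k, List.exists_mem_cons_iff]
    by_cases hA : pvCovS acc k <;> by_cases hB : ∃ i ∈ t, i ≤ k ∧ k < i + rr <;>
      simp [hA, hB] <;> omega

theorem pv_emit_mem (acc : List (Int × Int)) (k : Int) :
    k ∈ acc.reverse.flatMap (fun p => PySem.List.pyRange p.1 p.2 1) ↔ pvCovS acc k := by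
  simp only [List.mem_flatMap, List.mem_reverse, PySem.List.mem_pyRange_one, pvCovS]

theorem pv_emit_pairwise (total : Int) (acc : List (Int × Int)) (h : pvIvOK total acc) :
    (acc.reverse.flatMap (fun p => PySem.List.pyRange p.1 p.2 1)).Pairwise (· < ·) := by
  induction acc with
  | nil => simp
  | cons p rest ih =>
    have htl : pvIvOK total rest := ⟨fun q hq => h.1 q (List.mem_cons_of_mem _ hq), h.2.tail⟩
    rw [List.reverse_cons, List.flatMap_append]
    rw [List.pairwise_append]
    refine ⟨ih htl, by simpa using PySem.List.pairwise_lt_pyRange_one p.1 p.2, ?_⟩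
    intro a ha b hb
    rw [List.mem_flatMap] at ha
    obtain ⟨q, hq, haq⟩ := ha
    rw [List.mem_reverse] at hq
    rw [PySem.List.mem_pyRange_one] at haq
    simp only [List.flatMap_cons, List.flatMap_nil, List.append_nil, PySem.List.mem_pyRange_one] at hb
    have := pv_rest_lt total p rest h q hq
    omega

theorem pvIvOK_nil (total : Int) : pvIvOK total [] := ⟨by simp, by simp⟩

theorem pvB_fold (sel : List Int) (total r : Int) :
    pvIvOK total ((PySem.List.sorted sel (fun x => x) false).foldl
        (pvMergeStep (if r > 1 then r else 1) total) []) ∧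
    ∀ k, pvCovS ((PySem.List.sorted sel (fun x => x) false).foldl
        (pvMergeStep (if r > 1 then r else 1) total) []) k ↔
      (0 ≤ k ∧ k < total ∧ ∃ i ∈ sel, i ≤ k ∧ k < i + (if r > 1 then r else 1)) := by
  obtain ⟨h1, h2⟩ := pv_fold_inv (if r > 1 then r else 1) total
    (PySem.List.sorted sel (fun x => x) false)
    (PySem.List.sorted_pairwise sel (fun x => x))
    [] (pvIvOK_nil total) (by simp)
  refine ⟨h1, fun k => ?_⟩
  rw [h2 k]
  simp only [pvCovS, List.not_mem_nil, false_and, exists_const, false_or,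
    PySem.List.mem_sorted]

theorem pvB_pairwise (sel : List Int) (total r : Int) :
    (expand_replace_indices_py_alt sel total r).Pairwise (· < ·) := by
  unfold expand_replace_indices_py_alt
  exact pv_emit_pairwise total _ (pvB_fold sel total r).1

theorem pvB_mem (sel : List Int) (total r : Int) (k : Int) :
    k ∈ expand_replace_indices_py_alt sel total r ↔ pvCov sel total (if r ≤ 1 then 1 else r) k := by
  unfold expand_replace_indices_py_alt pvCov
  rw [pv_emit_mem, (pvB_fold sel total r).2 k]
  have hrr : (if r > 1 then r else 1) = (if r ≤ 1 then 1 else r) := by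
    split <;> split <;> omega
  rw [hrr]

-- ===== VERDICT (by name: the statement is the Claim_ definition above) =====
theorem expand_replace_indices_py_spec : Claim_equal_expand_replace_indices_py := by
  intro sel total r _
  unfold Spec_expand_replace_indices_py
  exact pv_eq_of_pairwise_lt _ _ (pvA_pairwise sel total r) (pvB_pairwise sel total r)
    (fun k => (pvA_mem sel total r k).trans (pvB_mem sel total r k).symm)
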